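-- pv_equiv track=rewrite | github.com/VickyMerzOwn/gargantuous-parakeet | main.py | most_weighted
-- ===== SOURCE A (Python) =====
-- def most_weighted(x,li,p):
-- 	nums=['2','3','4','5','6','7','8','9','10','J','Q','K','A']
-- 	if x[0]!=p[0]:
-- 		return False
-- 	else:
-- 		for l in li:
-- 			if l[0]==p[0] and nums.index(x[1:])<=nums.index(l[1:]):
-- 				return False
--
-- 		return True
-- ===== SOURCE B (Python) =====
-- def most_weighted(x, li, p):
--     nums = ['2', '3', '4', '5', '6', '7', '8', '9', '10', 'J', 'Q', 'K', 'A']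
--     if x[0] != p[0]:
--         return False
--     suit_ranks = [l[1:] for l in li if l[0] == p[0]]
--     # walk the deck from the highest rank down: the first rank we meet decides
--     for r in reversed(nums):
--         if r in suit_ranks:
--             return False
--         if r == x[1:]:
--             return True
--     return True
-- ===== Notes on version B (the rewrite author's own statement) =====
-- stated objective: alternative
-- what changed: B never calls nums.index: instead of comparing numeric weights per card, it collects the same-suit ranks and then walks the deck from the top rank downwards, returning at the first rank that is held - False if a same-suit card holds it, True if it is x's rank.
-- outside the precondition, e.g. on most_weighted('H9', ['HK', 'Hz'], 'H2'): A returns False, B returns False; on most_weighted('H9', ['Hz'], 'H2'): A raises ValueError, B returns True; on most_weighted('Hz', ['HK'], 'H2'): A raises ValueError, B returns False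
import Mathlib
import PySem

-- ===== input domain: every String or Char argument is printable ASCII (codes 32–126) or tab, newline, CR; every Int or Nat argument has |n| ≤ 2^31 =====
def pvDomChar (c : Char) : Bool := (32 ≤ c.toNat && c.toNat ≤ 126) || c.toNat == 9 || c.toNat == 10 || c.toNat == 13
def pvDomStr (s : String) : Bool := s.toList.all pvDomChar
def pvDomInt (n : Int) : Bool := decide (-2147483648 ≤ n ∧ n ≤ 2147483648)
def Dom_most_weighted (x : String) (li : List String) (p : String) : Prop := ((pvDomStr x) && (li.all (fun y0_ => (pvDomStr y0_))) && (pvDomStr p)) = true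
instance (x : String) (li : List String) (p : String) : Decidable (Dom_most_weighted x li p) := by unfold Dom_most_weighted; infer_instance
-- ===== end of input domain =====

-- B drops A's per-card nums.index comparisons: it collects the same-suit ranks and walks the deck top-down, deciding at the first rank held; objective: alternative.


-- ===== PORT A =====
-- nums = ['2',...,'A'] (the same literal appears in both Pythons)
def pvNums : List String := ["2", "3", "4", "5", "6", "7", "8", "9", "10", "J", "Q", "K", "A"]

-- nums.index(s): exact on Pre_ (s ∈ pvNums); a missing rank is Python's ValueError, excluded by Pre_
def pvIdx (s : String) : Nat := (PySem.List.index? pvNums s).getD 0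

-- s[1:]
def pvRank (s : String) : String := PySem.Str.slice s (some 1) none

-- A's for-loop with its early 'return False'
def pvLoopA (x : String) (pc : Option Char) : List String → Bool
  | [] => true
  | l :: rest =>
      if PySem.Str.pyGet? l 0 = pc ∧ pvIdx (pvRank x) ≤ pvIdx (pvRank l) then false
      else pvLoopA x pc rest

def most_weighted (x : String) (li : List String) (p : String) : Bool :=
  if PySem.Str.pyGet? x 0 ≠ PySem.Str.pyGet? p 0 then false
  else pvLoopA x (PySem.Str.pyGet? p 0) li

-- ===== PORT B =====
-- B's 'for r in reversed(nums)' loop: at the first rank held, same-suit wins give False, x's rank gives True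
def pvLoopB (xr : String) (s : List String) : List String → Bool
  | [] => true
  | r :: rest =>
      if r ∈ s then false
      else if r = xr then true
      else pvLoopB xr s rest

def most_weighted_alt (x : String) (li : List String) (p : String) : Bool :=
  if PySem.Str.pyGet? x 0 ≠ PySem.Str.pyGet? p 0 then false
  else
    let suitRanks := (li.filter (fun l => PySem.Str.pyGet? l 0 == PySem.Str.pyGet? p 0)).map pvRank
    pvLoopB (pvRank x) suitRanks pvNums.reverse

-- ===== PRECONDITION & SPEC =====
-- Pre_ excludes malformed card strings (an empty x/p/list element, or — when suits match — a rank
-- outside the deck on x or on a same-suit card): there A raises (IndexError/ValueError) or returns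
-- only thanks to its short-circuit while B's deck walk decides differently.
def Pre_most_weighted (x : String) (li : List String) (p : String) : Prop :=
  x ≠ "" ∧ p ≠ "" ∧
  (PySem.Str.pyGet? x 0 = PySem.Str.pyGet? p 0 →
    pvRank x ∈ pvNums ∧
    ∀ l ∈ li, l ≠ "" ∧ (PySem.Str.pyGet? l 0 = PySem.Str.pyGet? p 0 → pvRank l ∈ pvNums))
instance (x : String) (li : List String) (p : String) : Decidable (Pre_most_weighted x li p) := by
  unfold Pre_most_weighted; infer_instance

def pvWitness_most_weighted : String × List String × String := ("H3", ["H2", "D5"], "H7")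

def Spec_most_weighted (x : String) (li : List String) (p : String) (out : Bool) : Prop := out = most_weighted_alt x li p
instance (x : String) (li : List String) (p : String) (out : Bool) : Decidable (Spec_most_weighted x li p out) := by unfold Spec_most_weighted; infer_instance

-- ===== CLAIM (what is proved, stated in full; the proofs are below) =====
def Claim_equal_most_weighted : Prop := ∀ (x : String) (li : List String) (p : String), Dom_most_weighted x li p → Pre_most_weighted x li p → Spec_most_weighted x li p (most_weighted x li p)

-- ===== LEMMAS AND PROOFS =====

-- A's loop decides "every same-suit card weighs strictly less than x"
theorem pvLoopA_eq_decide (x : String) (pc : Option Char) (li : List String) :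
    pvLoopA x pc li
      = decide (∀ l ∈ li, PySem.Str.pyGet? l 0 = pc → pvIdx (pvRank l) < pvIdx (pvRank x)) := by
  induction li with
  | nil => simp [pvLoopA]
  | cons l rest ih =>
      simp only [pvLoopA]
      by_cases h : PySem.Str.pyGet? l 0 = pc ∧ pvIdx (pvRank x) ≤ pvIdx (pvRank l)
      · rw [if_pos h]
        symm
        simp only [decide_eq_false_iff_not]
        intro hall
        have := hall l (List.mem_cons_self) h.1
        omega
      · rw [if_neg h, ih]
        simp only [decide_eq_decide]
        constructor
        · intro hall l' hl' hpc
          rcases List.mem_cons.1 hl' with hl' | hl'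
          · subst hl'
            by_contra hlt
            exact h ⟨hpc, by omega⟩
          · exact hall l' hl' hpc
        · intro hall l' hl' hpc
          exact hall l' (List.mem_cons_of_mem _ hl') hpc

-- B's loop succeeds iff xr itself is not held and nothing before xr in the walk is held
theorem pvLoopB_iff (xr : String) (s : List String) (rs : List String) :
    pvLoopB xr s rs = true ↔
      ((∀ r ∈ rs.takeWhile (fun r => r ≠ xr), r ∉ s) ∧ (xr ∈ rs → xr ∉ s)) := by
  induction rs with
  | nil => simp [pvLoopB]
  | cons r rest ih =>
      simp only [pvLoopB]
      by_cases hs : r ∈ s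
      · rw [if_pos hs]
        simp only [Bool.false_eq_true, false_iff, not_and]
        intro h1
        by_cases hx : r = xr
        · subst hx; exact fun h => absurd hs (h List.mem_cons_self)
        · refine absurd hs (h1 r ?_)
          rw [List.takeWhile_cons, if_pos (by simp [hx])]
          exact List.mem_cons_self
      · rw [if_neg hs]
        by_cases hx : r = xr
        · subst hx
          rw [if_pos rfl]
          simp [hs]
        · rw [if_neg hx, ih]
          constructor
          · rintro ⟨h1, h2⟩
            refine ⟨?_, ?_⟩
            · intro r' hr'
              rw [List.takeWhile_cons, if_pos (by simp [hx])] at hr'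
              rcases List.mem_cons.1 hr' with h | h
              · subst h; exact hs
              · exact h1 r' h
            · intro hmem
              rcases List.mem_cons.1 hmem with h | h
              · exact absurd h.symm hx
              · exact h2 h
          · rintro ⟨h1, h2⟩
            refine ⟨?_, fun h => h2 (List.mem_cons_of_mem _ h)⟩
            intro r' hr'
            exact h1 r' (by rw [List.takeWhile_cons, if_pos (by simp [hx])]; exact List.mem_cons_of_mem _ hr')

-- the concrete bridge on the 13-element deck: for ranks in the deck, "strictly lighter than xr"
-- is "neither xr itself nor met before xr in the top-down walk"
theorem pvKey : ∀ xr ∈ pvNums, ∀ s ∈ pvNums,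
    (pvIdx s < pvIdx xr ↔ (s ≠ xr ∧ s ∉ pvNums.reverse.takeWhile (fun r => r ≠ xr))) := by
  decide

theorem pvXr_mem_reverse (xr : String) (h : xr ∈ pvNums) : xr ∈ pvNums.reverse :=
  List.mem_reverse.2 h

-- ===== VERDICT (by name: the statement is the Claim_ definition above) =====
theorem most_weighted_spec : Claim_equal_most_weighted := by
  intro x li p _ hpre
  unfold Spec_most_weighted most_weighted most_weighted_alt
  by_cases hsuit : PySem.Str.pyGet? x 0 = PySem.Str.pyGet? p 0
  · rw [if_neg (not_not_intro hsuit), if_neg (not_not_intro hsuit)]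
    obtain ⟨hxmem, hli⟩ := hpre.2.2 hsuit
    rw [pvLoopA_eq_decide]
    -- membership of a rank in B's suitRanks list
    have hmemS : ∀ s : String,
        (s ∈ (li.filter (fun l => PySem.Str.pyGet? l 0 == PySem.Str.pyGet? p 0)).map pvRank)
          ↔ ∃ l ∈ li, PySem.Str.pyGet? l 0 = PySem.Str.pyGet? p 0 ∧ pvRank l = s := by
      intro s
      simp only [List.mem_map, List.mem_filter, beq_iff_eq]
      constructor
      · rintro ⟨l, ⟨hl, hc⟩, rfl⟩; exact ⟨l, hl, hc, rfl⟩
      · rintro ⟨l, hl, hc, rfl⟩; exact ⟨l, ⟨hl, hc⟩, rfl⟩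
    by_cases hA : ∀ l ∈ li, PySem.Str.pyGet? l 0 = PySem.Str.pyGet? p 0 → pvIdx (pvRank l) < pvIdx (pvRank x)
    · rw [decide_eq_true hA]
      symm
      rw [pvLoopB_iff]
      refine ⟨?_, ?_⟩
      · intro r hr hrS
        obtain ⟨l, hl, hc, rfl⟩ := (hmemS r).1 hrS
        have hlt := hA l hl hc
        have hln := (hli l hl).2 hc
        have := (pvKey (pvRank x) hxmem (pvRank l) hln).1 hlt
        exact this.2 hr
      · intro _ hxS
        obtain ⟨l, hl, hc, heq⟩ := (hmemS (pvRank x)).1 hxS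
        have := hA l hl hc
        rw [heq] at this
        omega
    · rw [decide_eq_false hA]
      symm
      rw [Bool.eq_false_iff]
      intro hB
      rw [pvLoopB_iff] at hB
      apply hA
      intro l hl hc
      have hln := (hli l hl).2 hc
      rw [pvKey (pvRank x) hxmem (pvRank l) hln]
      have hSmem : pvRank l ∈ (li.filter (fun l => PySem.Str.pyGet? l 0 == PySem.Str.pyGet? p 0)).map pvRank :=
        (hmemS (pvRank l)).2 ⟨l, hl, hc, rfl⟩
      constructor
      · intro heq
        exact (hB.2 (pvXr_mem_reverse _ hxmem)) (heq ▸ hSmem)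
      · intro hmem
        exact (hB.1 _ hmem) hSmem
  · rw [if_pos hsuit, if_pos hsuit]
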